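-- pv_equiv track=rewrite | github.com/Gloom-shin/upbit-news-alert | app/tracker.py | primary_close_reason
-- ===== SOURCE A (Python) =====
-- def primary_close_reason(outcomes: dict[str, int | None]) -> tuple[str, int] | None:
--     """가장 먼저 발생한 기준 = 1차 종료 사유. (criterion, days_to_trigger) 또는 None.
--     여러 기준이 같은 인덱스에 동시 발생하면 우선순위:
--     first_red > below_entry > trailing_drop > consecutive_red
--     (보수적으로 빠른 신호에 가중)."""
--     priority = ["first_red", "below_entry", "trailing_drop", "consecutive_red"]
--     triggered = [(p, outcomes[p]) for p in priority if outcomes.get(p) is not None]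
--     if not triggered:
--         return None
--     triggered.sort(key=lambda x: (x[1], priority.index(x[0])))
--     crit, idx = triggered[0]
--     return crit, idx + 1  # days_to_trigger = 1-based (entry 다음 1일째 = 1)
-- ===== SOURCE B (Python) =====
-- def primary_close_reason(outcomes: dict[str, int | None]) -> tuple[str, int] | None:
--     """Single pass over the priority list tracking the best (criterion, value);
--     strict '<' keeps the earlier (higher-priority) criterion on ties."""
--     best = None
--     for p in ["first_red", "below_entry", "trailing_drop", "consecutive_red"]:
--         v = outcomes.get(p)
--         if v is None:
--             continue
--         if best is None or v < best[1]:
--             best = (p, v)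
--     if best is None:
--         return None
--     return best[0], best[1] + 1
-- ===== Notes on version B (the rewrite author's own statement) =====
-- stated objective: simpler
-- what changed: Replaced build-filtered-list, stable sort by (value, priority.index) and take-head with a single pass over the priority list tracking the running minimum with strict '<' (iteration order breaks ties), removing the sort and all index lookups.
import Mathlib
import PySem

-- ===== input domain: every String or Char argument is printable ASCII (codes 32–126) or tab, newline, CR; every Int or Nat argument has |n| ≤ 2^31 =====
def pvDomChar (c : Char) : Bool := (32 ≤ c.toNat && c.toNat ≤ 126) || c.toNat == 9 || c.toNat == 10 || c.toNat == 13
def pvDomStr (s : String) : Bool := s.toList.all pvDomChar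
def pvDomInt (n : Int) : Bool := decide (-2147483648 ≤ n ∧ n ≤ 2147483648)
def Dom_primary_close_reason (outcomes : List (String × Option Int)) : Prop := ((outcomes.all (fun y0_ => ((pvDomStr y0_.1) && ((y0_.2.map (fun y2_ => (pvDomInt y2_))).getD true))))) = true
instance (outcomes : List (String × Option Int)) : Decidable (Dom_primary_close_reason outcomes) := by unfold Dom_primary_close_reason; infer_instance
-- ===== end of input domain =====

-- B replaces A's filter + stable sort by (value, priority index) + head with a single
-- pass over the priority list tracking the running minimum (strict '<' keeps earlier
-- criteria on ties); objective: simpler.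

-- ===== PORT A =====
def primary_close_reason (outcomes : List (String × Option Int)) : Option (String × Int) :=
  let priority : List String := ["first_red", "below_entry", "trailing_drop", "consecutive_red"]
  let d := PySem.Dict.mk outcomes
  -- triggered = [(p, outcomes[p]) for p in priority if outcomes.get(p) is not None]
  let triggered : List (String × Int) :=
    priority.foldr (fun p acc =>
      match d.get? p with
      | some (some v) => (p, v) :: acc
      | _ => acc) []
  if triggered = [] then none
  else
    -- triggered.sort(key=lambda x: (x[1], priority.index(x[0])))
    -- crit, idx = triggered[0]; return crit, idx + 1
    (PySem.List.sorted2 triggered (fun x => x.2)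
        (fun x => (PySem.List.index? priority x.1).getD 0)).head?.map
      (fun ci => (ci.1, ci.2 + 1))

-- ===== PORT B =====
def pcrLoop (d : PySem.Dict String (Option Int)) :
    List String → Option (String × Int) → Option (String × Int)
  | [], best => best
  | p :: rest, best =>
    -- v = outcomes.get(p)  (missing key and stored None both read as None)
    let v? : Option Int := (d.get? p).getD none
    match v?, best with
    | none, _ => pcrLoop d rest best
    | some v, none => pcrLoop d rest (some (p, v))
    | some v, some (bc, bv) =>
      if v < bv then pcrLoop d rest (some (p, v)) else pcrLoop d rest (some (bc, bv))

def primary_close_reason_alt (outcomes : List (String × Option Int)) : Option (String × Int) :=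
  (pcrLoop (PySem.Dict.mk outcomes)
      ["first_red", "below_entry", "trailing_drop", "consecutive_red"] none).map
    (fun cv => (cv.1, cv.2 + 1))

-- ===== PRECONDITION & SPEC =====
def Spec_primary_close_reason (outcomes : List (String × Option Int)) (out : Option (String × Int)) : Prop := out = primary_close_reason_alt outcomes
instance (outcomes : List (String × Option Int)) (out : Option (String × Int)) : Decidable (Spec_primary_close_reason outcomes out) := by unfold Spec_primary_close_reason; infer_instance

-- ===== CLAIM (what is proved, stated in full; the proofs are below) =====
def Claim_equal_primary_close_reason : Prop := ∀ (outcomes : List (String × Option Int)), Dom_primary_close_reason outcomes → Spec_primary_close_reason outcomes (primary_close_reason outcomes)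

-- ===== LEMMAS AND PROOFS =====
theorem pcr_core (g0 g1 g2 g3 : Option (Option Int)) (d : PySem.Dict String (Option Int))
    (h0 : d.get? "first_red" = g0) (h1 : d.get? "below_entry" = g1)
    (h2 : d.get? "trailing_drop" = g2) (h3 : d.get? "consecutive_red" = g3) :
    (let priority : List String := ["first_red", "below_entry", "trailing_drop", "consecutive_red"]
     let triggered : List (String × Int) :=
       priority.foldr (fun p acc =>
         match d.get? p with
         | some (some v) => (p, v) :: acc
         | _ => acc) []
     if triggered = [] then none
     else
       (PySem.List.sorted2 triggered (fun x => x.2)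
           (fun x => (PySem.List.index? priority x.1).getD 0)).head?.map
         (fun ci => (ci.1, ci.2 + 1))) =
    (pcrLoop d ["first_red", "below_entry", "trailing_drop", "consecutive_red"] none).map
      (fun cv => (cv.1, cv.2 + 1)) := by
  have e0 : (List.idxOf? "first_red" ["first_red", "below_entry", "trailing_drop", "consecutive_red"]).getD 0 = 0 := by decide
  have e1 : (List.idxOf? "below_entry" ["first_red", "below_entry", "trailing_drop", "consecutive_red"]).getD 0 = 1 := by decide
  have e2 : (List.idxOf? "trailing_drop" ["first_red", "below_entry", "trailing_drop", "consecutive_red"]).getD 0 = 2 := by decide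
  have e3 : (List.idxOf? "consecutive_red" ["first_red", "below_entry", "trailing_drop", "consecutive_red"]).getD 0 = 3 := by decide
  rcases g0 with _ | (_ | v0) <;> rcases g1 with _ | (_ | v1) <;>
    rcases g2 with _ | (_ | v2) <;> rcases g3 with _ | (_ | v3) <;>
    simp [pcrLoop, h0, h1, h2, h3, PySem.List.sorted2, PySem.List.insertBy, e0, e1, e2, e3] <;>
    (repeat' (split_ifs <;> try simp_all [PySem.List.insertBy, e0, e1, e2, e3])) <;> omega

-- ===== VERDICT (by name: the statement is the Claim_ definition above) =====
theorem primary_close_reason_spec : Claim_equal_primary_close_reason := by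
  intro outcomes _
  unfold Spec_primary_close_reason primary_close_reason primary_close_reason_alt
  exact pcr_core _ _ _ _ (PySem.Dict.mk outcomes) rfl rfl rfl rfl
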